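-- pv_equiv track=rewrite | github.com/thirdreality/LinuxBox_Supervisor | supervisor/ptest/rcp_test.py | fcs_update
-- ===== SOURCE A (Python) =====
-- HDLC_FCS_POLY = 0x8408
--
-- def fcs_update(fcs: int, byte: int) -> int:
--     fcs ^= byte
--     for _ in range(8):
--         if fcs & 1:
--             fcs = (fcs >> 1) ^ HDLC_FCS_POLY
--         else:
--             fcs >>= 1
--     return fcs
-- ===== SOURCE B (Python) =====
-- HDLC_FCS_POLY = 0x8408
--
--
-- def _make_table():
--     table = []
--     for b in range(256):
--         fcs = b
--         for _ in range(8):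
--             fcs = (fcs >> 1) ^ (HDLC_FCS_POLY * (fcs & 1))
--         table.append(fcs)
--     return table
--
--
-- FCS_TABLE = _make_table()
--
--
-- def fcs_update(fcs: int, byte: int) -> int:
--     x = fcs ^ byte
--     return (x >> 8) ^ FCS_TABLE[x & 0xFF]
-- ===== Notes on version B (the rewrite author's own statement) =====
-- stated objective: idiomatic
-- what changed: Replaces the per-call 8-iteration bit loop by the standard table-driven CRC form: a single lookup in a precomputed 256-entry table indexed by (fcs ^ byte) & 0xff, xored with (fcs ^ byte) >> 8.
import Mathlib
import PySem

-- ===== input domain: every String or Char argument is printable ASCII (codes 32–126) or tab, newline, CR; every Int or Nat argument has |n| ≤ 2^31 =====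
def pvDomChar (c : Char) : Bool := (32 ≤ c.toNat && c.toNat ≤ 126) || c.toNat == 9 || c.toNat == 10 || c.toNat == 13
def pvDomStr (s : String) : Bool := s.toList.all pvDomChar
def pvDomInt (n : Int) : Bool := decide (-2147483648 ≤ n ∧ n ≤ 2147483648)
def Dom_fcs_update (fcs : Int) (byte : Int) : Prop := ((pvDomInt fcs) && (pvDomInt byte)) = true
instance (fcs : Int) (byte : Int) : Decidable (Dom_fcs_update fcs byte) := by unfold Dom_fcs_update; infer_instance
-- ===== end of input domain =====

-- B replaces A's per-call 8-round bit loop by the standard table-driven CRC form: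
-- one lookup in a precomputed 256-entry table (objective: idiomatic).

-- ===== PORT A =====
def HDLC_FCS_POLY : Int := 0x8408

def fcs_update (fcs : Int) (byte : Int) : Int :=
  (List.range 8).foldl
    (fun f _ =>
      if PySem.Int.band f 1 ≠ 0 then PySem.Int.bxor (f >>> (1 : Nat)) HDLC_FCS_POLY
      else f >>> (1 : Nat))
    (PySem.Int.bxor fcs byte)

-- ===== PORT B =====
def pvTableEntry (b : Int) : Int :=
  (List.range 8).foldl
    (fun f _ => PySem.Int.bxor (f >>> (1 : Nat)) (HDLC_FCS_POLY * PySem.Int.band f 1))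
    b

def pvFcsTable : List Int := (List.range 256).map (fun b => pvTableEntry (Int.ofNat b))

def fcs_update_alt (fcs : Int) (byte : Int) : Int :=
  let x := PySem.Int.bxor fcs byte
  PySem.Int.bxor (x >>> (8 : Nat)) (pvFcsTable.getD (PySem.Int.band x 255).toNat 0)

-- ===== PRECONDITION & SPEC =====
def Spec_fcs_update (fcs : Int) (byte : Int) (out : Int) : Prop := out = fcs_update_alt fcs byte
instance (fcs : Int) (byte : Int) (out : Int) : Decidable (Spec_fcs_update fcs byte out) := by unfold Spec_fcs_update; infer_instance

-- ===== CLAIM (what is proved, stated in full; the proofs are below) =====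
def Claim_equal_fcs_update : Prop := ∀ (fcs : Int) (byte : Int), Dom_fcs_update fcs byte → Spec_fcs_update fcs byte (fcs_update fcs byte)

-- ===== LEMMAS AND PROOFS =====

-- the loop body of both ports, as a single step
def pvStep (f : Int) : Int :=
  if PySem.Int.band f 1 ≠ 0 then PySem.Int.bxor (f >>> (1 : Nat)) HDLC_FCS_POLY
  else f >>> (1 : Nat)

-- n-fold application of pvStep, applied at the front
def pvIter : Nat → Int → Int
  | 0, y => y
  | n + 1, y => pvIter n (pvStep y)

theorem pvIter_succ (n : Nat) (y : Int) : pvIter (n + 1) y = pvIter n (pvStep y) := rfl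

theorem fold_eq_iter : ∀ (l : List Nat) (y : Int),
    l.foldl (fun f _ => pvStep f) y = pvIter l.length y := by
  intro l
  induction l with
  | nil => intro y; rfl
  | cons a l ih => intro y; simpa [List.foldl] using ih (pvStep y)

theorem fcs_update_eq_iter (fcs byte : Int) :
    fcs_update fcs byte = pvIter 8 (PySem.Int.bxor fcs byte) := by
  show (List.range 8).foldl (fun f _ => pvStep f) (PySem.Int.bxor fcs byte) = _
  rw [fold_eq_iter, List.length_range]

theorem band_one_cases (f : Int) : PySem.Int.band f 1 = 0 ∨ PySem.Int.band f 1 = 1 := by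
  cases f with
  | ofNat m =>
    have h : PySem.Int.band (Int.ofNat m) 1 = ((m &&& 1 : Nat) : Int) := by
      simp [PySem.Int.band]
    rw [h, Nat.and_one_is_mod]
    omega
  | negSucc m =>
    have h1 : ¬ (0 ≤ Int.negSucc m) := by rw [Int.negSucc_eq]; omega
    have h : PySem.Int.band (Int.negSucc m) 1 = ((1 - (1 &&& m) : Nat) : Int) := by
      simp [PySem.Int.band, h1]
    rw [h, Nat.and_comm, Nat.and_one_is_mod]
    omega

theorem stepB_eq (f : Int) :
    PySem.Int.bxor (f >>> (1 : Nat)) (HDLC_FCS_POLY * PySem.Int.band f 1) = pvStep f := by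
  rcases band_one_cases f with h | h <;> simp [pvStep, h]

theorem tableEntry_eq_iter (b : Int) : pvTableEntry b = pvIter 8 b := by
  unfold pvTableEntry
  have hfun : (fun (f : Int) (_ : Nat) =>
      PySem.Int.bxor (f >>> (1 : Nat)) (HDLC_FCS_POLY * PySem.Int.band f 1)) =
      (fun (f : Int) (_ : Nat) => pvStep f) :=
    funext fun f => funext fun _ => stepB_eq f
  rw [hfun, fold_eq_iter, List.length_range]

-- ---- testBit toolkit ----

theorem tb_ext {a b : Int} (h : ∀ k, a.testBit k = b.testBit k) : a = b := by
  cases a with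
  | ofNat m =>
    cases b with
    | ofNat n =>
      have : m = n := Nat.eq_of_testBit_eq fun i => by simpa [Int.testBit] using h i
      simp [this]
    | negSucc n =>
      exfalso
      have h1 : m.testBit (m + n) = false := Nat.testBit_lt_two_pow (by calc
        m ≤ m + n := Nat.le_add_right _ _
        _ < 2 ^ (m + n) := Nat.lt_two_pow_self)
      have h2 : n.testBit (m + n) = false := Nat.testBit_lt_two_pow (by calc
        n ≤ m + n := Nat.le_add_left _ _
        _ < 2 ^ (m + n) := Nat.lt_two_pow_self)
      have := h (m + n)
      simp [Int.testBit, h1, h2] at this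
  | negSucc m =>
    cases b with
    | ofNat n =>
      exfalso
      have h1 : m.testBit (m + n) = false := Nat.testBit_lt_two_pow (by calc
        m ≤ m + n := Nat.le_add_right _ _
        _ < 2 ^ (m + n) := Nat.lt_two_pow_self)
      have h2 : n.testBit (m + n) = false := Nat.testBit_lt_two_pow (by calc
        n ≤ m + n := Nat.le_add_left _ _
        _ < 2 ^ (m + n) := Nat.lt_two_pow_self)
      have := h (m + n)
      simp [Int.testBit, h1, h2] at this
    | negSucc n =>
      have : m = n := Nat.eq_of_testBit_eq fun i => by
        have := h i
        simpa [Int.testBit] using this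
      simp [this]

theorem bxor_eq_xor (a b : Int) : PySem.Int.bxor a b = Int.xor a b := by
  cases a with
  | ofNat m =>
    cases b with
    | ofNat n => simp [PySem.Int.bxor, Int.xor]
    | negSucc n =>
      simp [PySem.Int.bxor, Int.xor, Int.negSucc_eq]
      omega
  | negSucc m =>
    cases b with
    | ofNat n =>
      simp [PySem.Int.bxor, Int.xor, Int.negSucc_eq]
      omega
    | negSucc n =>
      simp [PySem.Int.bxor, Int.xor, Int.negSucc_eq]
      omega

theorem tb_bxor (a b : Int) (k : Nat) :
    (PySem.Int.bxor a b).testBit k = ((a.testBit k) ^^ (b.testBit k)) := by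
  rw [bxor_eq_xor, Int.testBit_lxor]

theorem tb_shiftRight (x : Int) (n k : Nat) : (x >>> n).testBit k = x.testBit (n + k) := by
  cases x with
  | ofNat m =>
    show (m >>> n).testBit k = m.testBit (n + k)
    exact Nat.testBit_shiftRight m
  | negSucc m =>
    show (!(m >>> n).testBit k) = (!m.testBit (n + k))
    rw [Nat.testBit_shiftRight]

theorem bit_false_eq (c : Int) : Int.bit false c = 2 * c := rfl

theorem tb_two_mul_zero (c : Int) : (2 * c).testBit 0 = false := by
  rw [← bit_false_eq, Int.testBit_bit_zero]

theorem tb_two_mul_succ (c : Int) (k : Nat) : (2 * c).testBit (k + 1) = c.testBit k := by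
  rw [← bit_false_eq, Int.testBit_bit_succ]

theorem tb_two_pow_mul (n : Nat) (c : Int) (k : Nat) :
    (2 ^ n * c).testBit k = (decide (n ≤ k) && c.testBit (k - n)) := by
  induction n generalizing k with
  | zero => simp
  | succ n ih =>
    have h2 : (2 : Int) ^ (n + 1) * c = 2 * (2 ^ n * c) := by ring
    rw [h2]
    cases k with
    | zero => simp [tb_two_mul_zero]
    | succ k =>
      rw [tb_two_mul_succ, ih]
      simp [Nat.succ_sub_succ]

-- finite complement identity for the low byte, checked exhaustively
set_option maxRecDepth 8192 in
theorem c255fin : ∀ (r : Fin 256) (k : Fin 8),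
    Nat.testBit (255 - r.1) k.1 = !(Nat.testBit r.1 k.1) := by decide

theorem nat_c255 (r k : Nat) (hr : r < 256) :
    (255 - r).testBit k = (decide (k < 8) && !(r.testBit k)) := by
  by_cases hk : k < 8
  · simpa [hk] using c255fin ⟨r, hr⟩ ⟨k, hk⟩
  · have h1 : (255 - r).testBit k = false :=
      Nat.testBit_lt_two_pow (by
        calc 255 - r < 256 := by omega
        _ = 2 ^ 8 := rfl
        _ ≤ 2 ^ k := Nat.pow_le_pow_right (by norm_num) (by omega))
    simp [h1, hk]

theorem nat_tb255 (k : Nat) : (255 : Nat).testBit k = decide (k < 8) := by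
  have : (255 : Nat) = 2 ^ 8 - 1 := rfl
  rw [this, Nat.testBit_two_pow_sub_one]

theorem band255_eval_neg (m : Nat) :
    PySem.Int.band (Int.negSucc m) 255 = ((255 - (255 &&& m) : Nat) : Int) := by
  have h1 : ¬ (0 ≤ Int.negSucc m) := by rw [Int.negSucc_eq]; omega
  simp [PySem.Int.band, h1, Nat.and_comm]

theorem tb_band255 (x : Int) (k : Nat) :
    (PySem.Int.band x 255).testBit k = (decide (k < 8) && x.testBit k) := by
  cases x with
  | ofNat m =>
    have : PySem.Int.band (Int.ofNat m) 255 = ((m &&& 255 : Nat) : Int) := by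
      simp [PySem.Int.band]
    rw [this]
    simp [Int.testBit, Nat.testBit_and, nat_tb255, Bool.and_comm]
  | negSucc m =>
    rw [band255_eval_neg]
    have hr : 255 &&& m < 256 := by
      have := Nat.and_le_left (n := 255) (m := m); omega
    have : ((255 - (255 &&& m) : Nat) : Int).testBit k = (255 - (255 &&& m)).testBit k := by
      simp [Int.testBit]
    rw [this, nat_c255 _ _ hr]
    by_cases hk : k < 8
    · simp [Int.testBit, hk, Nat.testBit_and, nat_tb255]
    · simp [hk]

theorem band255_bounds (x : Int) : 0 ≤ PySem.Int.band x 255 ∧ PySem.Int.band x 255 < 256 := by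
  cases x with
  | ofNat m =>
    have : PySem.Int.band (Int.ofNat m) 255 = ((m &&& 255 : Nat) : Int) := by
      simp [PySem.Int.band]
    rw [this]
    have : m &&& 255 ≤ 255 := Nat.and_le_right
    omega
  | negSucc m =>
    rw [band255_eval_neg]
    omega

theorem tb_band_one (y : Int) : (PySem.Int.band y 1 ≠ 0) ↔ y.testBit 0 = true := by
  cases y with
  | ofNat m =>
    have h : PySem.Int.band (Int.ofNat m) 1 = ((m &&& 1 : Nat) : Int) := by
      simp [PySem.Int.band]
    rw [h]
    have h1 : m &&& 1 = m % 2 := Nat.and_one_is_mod m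
    simp [Int.testBit, Nat.testBit, h1]
    omega
  | negSucc m =>
    have h1 : ¬ (0 ≤ Int.negSucc m) := by rw [Int.negSucc_eq]; omega
    have h : PySem.Int.band (Int.negSucc m) 1 = ((1 - (1 &&& m) : Nat) : Int) := by
      simp [PySem.Int.band, h1]
    rw [h]
    have h3 : 1 &&& m = m % 2 := by rw [Nat.and_comm]; exact Nat.and_one_is_mod m
    simp [Int.testBit, Nat.testBit, h3]
    omega

theorem bxor_right_comm (u v w : Int) :
    PySem.Int.bxor (PySem.Int.bxor u v) w = PySem.Int.bxor (PySem.Int.bxor u w) v := by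
  apply tb_ext
  intro k
  simp only [tb_bxor]
  cases u.testBit k <;> cases v.testBit k <;> cases w.testBit k <;> rfl

theorem shiftRight_one_bxor (a c : Int) :
    (PySem.Int.bxor a (2 * c)) >>> (1 : Nat) = PySem.Int.bxor (a >>> (1 : Nat)) c := by
  apply tb_ext
  intro k
  rw [tb_shiftRight, tb_bxor, tb_bxor, tb_shiftRight]
  have h : 1 + k = k + 1 := by omega
  rw [h, tb_two_mul_succ]

theorem tb_zero_bxor_two_mul (a c : Int) :
    (PySem.Int.bxor a (2 * c)).testBit 0 = a.testBit 0 := by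
  rw [tb_bxor, tb_two_mul_zero, Bool.xor_false]

theorem step_bxor (a c : Int) :
    pvStep (PySem.Int.bxor a (2 * c)) = PySem.Int.bxor (pvStep a) c := by
  have hcond : (PySem.Int.band (PySem.Int.bxor a (2 * c)) 1 ≠ 0) ↔ (PySem.Int.band a 1 ≠ 0) := by
    rw [tb_band_one, tb_band_one, tb_zero_bxor_two_mul]
  unfold pvStep
  by_cases h : PySem.Int.band a 1 ≠ 0
  · rw [if_pos (hcond.mpr h), if_pos h, shiftRight_one_bxor, bxor_right_comm]
  · rw [if_neg (fun hc => h (hcond.mp hc)), if_neg h, shiftRight_one_bxor]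

theorem iter_bxor : ∀ (n : Nat) (a c : Int),
    pvIter n (PySem.Int.bxor a (2 ^ n * c)) = PySem.Int.bxor (pvIter n a) c := by
  intro n
  induction n with
  | zero => intro a c; simp [pvIter]
  | succ n ih =>
    intro a c
    have h2 : (2 : Int) ^ (n + 1) * c = 2 * (2 ^ n * c) := by ring
    rw [pvIter_succ, h2, step_bxor, ih, pvIter_succ]

theorem decomp (x : Int) :
    PySem.Int.bxor (PySem.Int.band x 255) (2 ^ 8 * (x >>> (8 : Nat))) = x := by
  apply tb_ext
  intro k
  rw [tb_bxor, tb_band255, tb_two_pow_mul, tb_shiftRight]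
  by_cases hk : k < 8
  · simp [hk, Nat.not_le.mpr hk]
  · have h8 : 8 ≤ k := by omega
    have h : 8 + (k - 8) = k := by omega
    simp [hk, h8, h]

theorem table_getD (r : Int) (h0 : 0 ≤ r) (h : r < 256) :
    pvFcsTable.getD r.toNat 0 = pvTableEntry r := by
  have hlt : r.toNat < 256 := by omega
  have hr? : (List.range 256)[r.toNat]? = some r.toNat := by
    rw [List.getElem?_range hlt]
  have hmap : pvFcsTable[r.toNat]? = some (pvTableEntry (Int.ofNat r.toNat)) := by
    rw [pvFcsTable, List.getElem?_map, hr?, Option.map_some]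
  rw [List.getD_eq_getElem?_getD, hmap, Option.getD_some]
  have : Int.ofNat r.toNat = r := by exact_mod_cast Int.toNat_of_nonneg h0
  rw [this]

-- ===== VERDICT (by name: the statement is the Claim_ definition above) =====
theorem fcs_update_spec : Claim_equal_fcs_update := by
  intro fcs byte _
  show fcs_update fcs byte = fcs_update_alt fcs byte
  rw [fcs_update_eq_iter]
  show pvIter 8 (PySem.Int.bxor fcs byte) =
    PySem.Int.bxor ((PySem.Int.bxor fcs byte) >>> (8 : Nat))
      (pvFcsTable.getD (PySem.Int.band (PySem.Int.bxor fcs byte) 255).toNat 0)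
  generalize PySem.Int.bxor fcs byte = x
  obtain ⟨hb0, hb1⟩ := band255_bounds x
  rw [table_getD _ hb0 hb1, tableEntry_eq_iter]
  calc pvIter 8 x
      = pvIter 8 (PySem.Int.bxor (PySem.Int.band x 255) (2 ^ 8 * (x >>> (8 : Nat)))) := by
        rw [decomp]
    _ = PySem.Int.bxor (pvIter 8 (PySem.Int.band x 255)) (x >>> (8 : Nat)) := iter_bxor 8 _ _
    _ = PySem.Int.bxor (x >>> (8 : Nat)) (pvIter 8 (PySem.Int.band x 255)) :=
        PySem.Int.bxor_comm _ _
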